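-- pv_equiv track=rewrite | github.com/leomensah/PYTHON-DSA | productOfThree.py | productOfThree
-- ===== SOURCE A (Python) =====
-- def productOfThree(n: int) -> bool:
--     if n == 0:
--         return False
--     if n == 1:
--         return True
--     if n % 3 != 0:
--         return False
--     return productOfThree(n // 3)
-- ===== SOURCE B (Python) =====
-- def productOfThree(n: int) -> bool:
--     # Iterative divide-by-3 loop instead of tail recursion.
--     if n == 0:
--         return False
--     while n != 1:
--         if n == 0 or n % 3 != 0:
--             return False
--         n //= 3
--     return True
-- ===== Notes on version B (the rewrite author's own statement) =====
-- stated objective: simpler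
-- what changed: Replaces the tail recursion with an explicit while-loop over the same divide-by-3 recurrence, with no recursive call.
import Mathlib
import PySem

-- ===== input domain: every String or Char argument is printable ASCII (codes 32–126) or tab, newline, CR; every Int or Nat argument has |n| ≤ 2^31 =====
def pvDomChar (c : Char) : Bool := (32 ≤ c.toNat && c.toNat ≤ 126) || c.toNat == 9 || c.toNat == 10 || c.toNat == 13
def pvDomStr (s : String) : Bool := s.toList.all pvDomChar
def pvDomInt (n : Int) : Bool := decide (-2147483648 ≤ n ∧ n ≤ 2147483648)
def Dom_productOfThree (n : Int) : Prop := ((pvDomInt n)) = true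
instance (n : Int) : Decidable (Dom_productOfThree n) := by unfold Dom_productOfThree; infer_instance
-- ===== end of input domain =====

-- B replaces A's tail recursion with an explicit while-loop over the same divide-by-3 recurrence (objective: simpler).

-- termination helper used by both ports (cited in decreasing_by)
theorem pv_div3_natAbs_lt (n : Int) (h0 : n ≠ 0) (hm : PySem.Int.mod n 3 = 0) :
    (PySem.Int.floordiv n 3).natAbs < n.natAbs := by
  rw [PySem.Int.floordiv_eq_ediv_of_pos (by omega)]
  rw [PySem.Int.mod_eq_emod_of_pos (by omega)] at hm
  omega

-- ===== PORT A =====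
def productOfThree (n : Int) : Bool :=
  if n = 0 then false
  else if n = 1 then true
  else if PySem.Int.mod n 3 ≠ 0 then false
  else productOfThree (PySem.Int.floordiv n 3)
termination_by n.natAbs
decreasing_by exact pv_div3_natAbs_lt n (by assumption) (by omega)

-- ===== PORT B =====
-- the while-loop of Source B as a loop function on its state n
def pvAltLoop (n : Int) : Bool :=
  if n ≠ 1 then
    if n = 0 ∨ PySem.Int.mod n 3 ≠ 0 then false
    else pvAltLoop (PySem.Int.floordiv n 3)
  else true
termination_by n.natAbs
decreasing_by exact pv_div3_natAbs_lt n (by omega) (by omega)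

def productOfThree_alt (n : Int) : Bool :=
  if n = 0 then false
  else pvAltLoop n

-- ===== PRECONDITION & SPEC =====
def Spec_productOfThree (n : Int) (out : Bool) : Prop := out = productOfThree_alt n
instance (n : Int) (out : Bool) : Decidable (Spec_productOfThree n out) := by unfold Spec_productOfThree; infer_instance

-- ===== CLAIM (what is proved, stated in full; the proofs are below) =====
def Claim_equal_productOfThree : Prop := ∀ (n : Int), Dom_productOfThree n → Spec_productOfThree n (productOfThree n)

-- ===== LEMMAS AND PROOFS =====

theorem pvAltLoop_eq (n : Int) : n ≠ 0 → pvAltLoop n = productOfThree n := by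
  induction hn : n.natAbs using Nat.strong_induction_on generalizing n with
  | _ k ih =>
    intro h0
    rw [pvAltLoop, productOfThree]
    by_cases h1 : n = 1
    · simp [h1]
    · by_cases hm : PySem.Int.mod n 3 = 0
      · have hlt := pv_div3_natAbs_lt n h0 hm
        have hq0 : PySem.Int.floordiv n 3 ≠ 0 := by
          rw [PySem.Int.floordiv_eq_ediv_of_pos (by omega)]
          rw [PySem.Int.mod_eq_emod_of_pos (by omega)] at hm
          omega
        have he : PySem.Int.floordiv n 3 = n / 3 :=
          PySem.Int.floordiv_eq_ediv_of_pos (by omega)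
        rw [he] at hlt hq0
        simp [h0, h1]
        rw [ih _ (hn ▸ hlt) _ rfl hq0]
      · have hd : ¬ (3:Int) ∣ n := by
          rw [PySem.Int.mod_eq_emod_of_pos (by omega)] at hm
          omega
        simp [h0, h1, hd]

-- ===== VERDICT (by name: the statement is the Claim_ definition above) =====
theorem productOfThree_spec : Claim_equal_productOfThree := by
  intro n _
  unfold Spec_productOfThree productOfThree_alt
  by_cases h0 : n = 0
  · rw [productOfThree]; simp [h0]
  · rw [pvAltLoop_eq n h0]; simp [h0]
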